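-- pv_equiv track=rewrite | github.com/Orange-OpenSource/LatSeq | tools/rebuild_journeys.py | _match_ids
-- ===== SOURCE A (Python) =====
-- def _match_ids(point: dict, journey: dict):
--     match_ids = dict()
--     logging_ids = dict()
--     current_local_ids = journey['set_ids']
--     next_local_ids = point[6]
--     for key in next_local_ids.keys():
--         if key in current_local_ids:
--             if current_local_ids[key] == next_local_ids[key]:
--                 match_ids[key] = current_local_ids[key]
--             else:
--                 return False, {}, {} # matching failed, return False and empty dicts
--         else:
--             logging_ids[key] = next_local_ids[key]
--     return True, match_ids, logging_ids # matching successfull, return True and dictionary of neighbouring identifiers (match_ids) and identifiers only in local point (logging_ids)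
-- ===== SOURCE B (Python) =====
-- def _match_ids(point: dict, journey: dict):
--     current_local_ids = journey['set_ids']
--     next_local_ids = point[6]
--     # Set algebra: a conflict exists exactly when some key is shared but its
--     # (key, value) pair is not, i.e. the key intersection is larger than the
--     # item intersection (both dicts have unique keys, so the item intersection
--     # holds at most one pair per shared key).
--     common = next_local_ids.keys() & current_local_ids.keys()
--     if len(common) != len(next_local_ids.items() & current_local_ids.items()):
--         return False, {}, {}
--     match_ids = {k: current_local_ids[k] for k in next_local_ids if k in common}
--     logging_ids = {k: v for k, v in next_local_ids.items() if k not in common}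
--     return True, match_ids, logging_ids
-- ===== Notes on version B (the rewrite author's own statement) =====
-- stated objective: alternative
-- what changed: Instead of testing each key for a value conflict, B detects conflicts by set algebra -- comparing the cardinality of the key intersection with that of the item (key,value)-pair intersection -- and only then builds the two dicts by comprehensions over the precomputed common-key set; A fuses validation and construction in one early-returning loop.
import Mathlib
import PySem

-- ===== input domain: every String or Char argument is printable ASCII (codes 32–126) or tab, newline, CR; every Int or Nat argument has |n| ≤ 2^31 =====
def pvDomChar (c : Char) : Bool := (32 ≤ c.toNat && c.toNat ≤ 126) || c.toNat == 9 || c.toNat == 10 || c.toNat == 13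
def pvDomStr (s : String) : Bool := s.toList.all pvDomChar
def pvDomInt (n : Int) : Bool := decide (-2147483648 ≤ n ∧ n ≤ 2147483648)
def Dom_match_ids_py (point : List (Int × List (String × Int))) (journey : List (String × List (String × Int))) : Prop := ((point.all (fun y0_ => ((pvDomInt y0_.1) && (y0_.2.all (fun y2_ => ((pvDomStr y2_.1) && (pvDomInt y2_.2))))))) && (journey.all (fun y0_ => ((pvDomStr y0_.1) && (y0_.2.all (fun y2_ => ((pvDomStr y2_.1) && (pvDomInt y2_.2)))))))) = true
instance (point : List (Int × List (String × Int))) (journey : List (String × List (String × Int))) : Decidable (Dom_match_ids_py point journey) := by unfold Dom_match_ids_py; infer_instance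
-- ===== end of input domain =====

-- B replaces A's fused per-key validate-and-build loop with set algebra: a conflict is
-- detected by comparing the size of the key intersection with the size of the
-- (key, value)-pair intersection; the two dicts are then built separately. Equivalence
-- of the RETURN value is proved on inputs carrying the keys A looks up.

-- ===== PORT A =====
-- A's for-loop over next_local_ids with early return, building two dicts.
def matchIdsLoopA (cur : PySem.Dict String Int) :
    List (String × Int) → PySem.Dict String Int → PySem.Dict String Int →
    Bool × (List (String × Int)) × (List (String × Int))
  | [], m, l => (true, m.items, l.items)
  | (k, v) :: rest, m, l =>
    match cur.get? k with                      -- 'key in current_local_ids' + lookup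
    | some w => if w = v then matchIdsLoopA cur rest (m.insert k w) l
                else (false, [], [])           -- matching failed
    | none => matchIdsLoopA cur rest m (l.insert k v)

def match_ids_py (point : List (Int × List (String × Int))) (journey : List (String × List (String × Int))) : Bool × (List (String × Int)) × (List (String × Int)) :=
  -- journey['set_ids'] / point[6] raise KeyError when absent: Pre_ excludes that; the [] default is never reached inside Pre_
  let cur := PySem.Dict.mk ((PySem.Dict.mk journey).getD "set_ids" [])
  let nxt := (PySem.Dict.mk point).getD 6 []
  matchIdsLoopA cur nxt PySem.Dict.empty PySem.Dict.empty

-- ===== PORT B =====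
def match_ids_py_alt (point : List (Int × List (String × Int))) (journey : List (String × List (String × Int))) : Bool × (List (String × Int)) × (List (String × Int)) :=
  let curL := (PySem.Dict.mk journey).getD "set_ids" []
  let cur := PySem.Dict.mk curL
  let nxt := (PySem.Dict.mk point).getD 6 []
  -- common = next_local_ids.keys() & current_local_ids.keys()
  let common : PySem.Set String :=
    PySem.Set.inter (PySem.Set.ofList ((PySem.Dict.mk nxt).keys)) cur.keys
  -- len(next_local_ids.items() & current_local_ids.items())
  let interLen : Nat :=
    (PySem.Set.inter (PySem.Set.ofList ((PySem.Dict.mk nxt).items)) cur.items).length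
  if common.length ≠ interLen then (false, [], [])
  else
    (true,
     (nxt.filter (fun p => PySem.Set.contains common p.1)).map (fun p => (p.1, (cur.get? p.1).getD 0)),
     nxt.filter (fun p => !PySem.Set.contains common p.1))

-- ===== PRECONDITION & SPEC =====
-- Pre_ excludes inputs on which A raises KeyError ('set_ids' or 6 missing); the Nodup
-- conditions only state the dict representation invariant (a Python dict has distinct keys),
-- which every encoded input satisfies: they exclude nothing from A's real domain.
def Pre_match_ids_py (point : List (Int × List (String × Int))) (journey : List (String × List (String × Int))) : Prop :=
  (6 : Int) ∈ point.map Prod.fst ∧ "set_ids" ∈ journey.map Prod.fst ∧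
  (point.map Prod.fst).Nodup ∧ (journey.map Prod.fst).Nodup ∧
  (∀ p ∈ point, (p.2.map Prod.fst).Nodup) ∧ (∀ p ∈ journey, (p.2.map Prod.fst).Nodup)
instance (point : List (Int × List (String × Int))) (journey : List (String × List (String × Int))) : Decidable (Pre_match_ids_py point journey) := by unfold Pre_match_ids_py; infer_instance
def pvWitness_match_ids_py : (List (Int × List (String × Int))) × (List (String × List (String × Int))) :=
  ([(6, [("a", 1), ("b", 2)])], [("set_ids", [("a", 1), ("c", 3)])])
def Spec_match_ids_py (point : List (Int × List (String × Int))) (journey : List (String × List (String × Int))) (out : Bool × (List (String × Int)) × (List (String × Int))) : Prop := out = match_ids_py_alt point journey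
instance (point : List (Int × List (String × Int))) (journey : List (String × List (String × Int))) (out : Bool × (List (String × Int)) × (List (String × Int))) : Decidable (Spec_match_ids_py point journey out) := by unfold Spec_match_ids_py; infer_instance

-- ===== CLAIM (what is proved, stated in full; the proofs are below) =====
def Claim_equal_match_ids_py : Prop := ∀ (point : List (Int × List (String × Int))) (journey : List (String × List (String × Int))), Dom_match_ids_py point journey → Pre_match_ids_py point journey → Spec_match_ids_py point journey (match_ids_py point journey)

-- ===== LEMMAS AND PROOFS =====

-- a property of all values of a literal dict transfers to getD
lemma getD_mk_prop {κ : Type} [BEq κ] (P : List (String × Int) → Prop) (l : List (κ × List (String × Int))) (k : κ) (d : List (String × Int))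
    (hd : P d) (hl : ∀ p ∈ l, P p.2) : P ((PySem.Dict.mk l).getD k d) := by
  induction l with
  | nil => simpa [PySem.Dict.getD_eq_get?_getD, PySem.Dict.get?] using hd
  | cons p rest ih =>
    obtain ⟨k', v⟩ := p
    rw [PySem.Dict.getD_eq_get?_getD, PySem.Dict.get?_mk_cons]
    by_cases h : k' == k
    · simpa [h] using hl (k', v) (by simp)
    · simp only [h, Bool.false_eq_true, if_false, ← PySem.Dict.getD_eq_get?_getD]
      exact ih (fun p hp => hl p (by simp [hp]))

-- the fused loop equals guard + two comprehensions, for accumulators fresh w.r.t. nxt's keys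
lemma matchIdsLoopA_eq (cur : PySem.Dict String Int) (nxt : List (String × Int))
    (m l : PySem.Dict String Int)
    (hn : (nxt.map Prod.fst).Nodup)
    (hm : ∀ p ∈ nxt, m.contains p.1 = false) (hl : ∀ p ∈ nxt, l.contains p.1 = false) :
    matchIdsLoopA cur nxt m l =
      if nxt.any (fun p => cur.contains p.1 && !(cur.get? p.1 == some p.2)) then
        (false, [], [])
      else
        (true,
         m.items ++ (nxt.filter (fun p => cur.contains p.1)).map (fun p => (p.1, (cur.get? p.1).getD 0)),
         l.items ++ nxt.filter (fun p => !cur.contains p.1)) := by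
  induction nxt generalizing m l with
  | nil => simp [matchIdsLoopA]
  | cons p rest ih =>
    obtain ⟨k, v⟩ := p
    simp only [List.map_cons, List.nodup_cons] at hn
    have hk : k ∉ rest.map Prod.fst := hn.1
    have hrest := hn.2
    cases hcur : cur.get? k with
    | some w =>
      have hc : cur.contains k = true := by
        rw [PySem.Dict.contains_eq_isSome_get?, hcur]; rfl
      by_cases hwv : w = v
      · subst hwv
        have hm' : ∀ q ∈ rest, (m.insert k w).contains q.1 = false := by
          intro q hq
          rw [PySem.Dict.contains_insert]
          have : ¬ (q.1 == k) := by
            simp only [beq_iff_eq]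
            intro h; exact hk (h ▸ List.mem_map_of_mem hq)
          simp [this, hm q (by simp [hq])]
        have hitems : (m.insert k w).items = m.items ++ [(k, w)] :=
          PySem.Dict.items_insert_of_not_contains _ _ (hm (k, w) (by simp))
        simp only [matchIdsLoopA, hcur, if_pos]
        rw [ih (m.insert k w) l hrest hm' (fun q hq => hl q (by simp [hq])),
            show (((k, w) :: rest).any fun p => cur.contains p.1 && !(cur.get? p.1 == some p.2))
               = (rest.any fun p => cur.contains p.1 && !(cur.get? p.1 == some p.2)) from by
              simp [hc, hcur]]
        simp [hitems, hc, hcur]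
      · simp only [matchIdsLoopA, hcur, if_neg hwv]
        have : (cur.get? k == some v) = false := by simp [hcur, hwv]
        simp [List.any_cons, hc, this]
    | none =>
      have hc : cur.contains k = false := by
        rw [PySem.Dict.contains_eq_isSome_get?, hcur]; rfl
      have hl' : ∀ q ∈ rest, (l.insert k v).contains q.1 = false := by
        intro q hq
        rw [PySem.Dict.contains_insert]
        have : ¬ (q.1 == k) := by
          simp only [beq_iff_eq]
          intro h; exact hk (h ▸ List.mem_map_of_mem hq)
        simp [this, hl q (by simp [hq])]
      have hitems : (l.insert k v).items = l.items ++ [(k, v)] :=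
        PySem.Dict.items_insert_of_not_contains _ _ (hl (k, v) (by simp))
      simp only [matchIdsLoopA, hcur]
      rw [ih m (l.insert k v) hrest (fun q hq => hm q (by simp [hq])) hl',
          show (((k, v) :: rest).any fun p => cur.contains p.1 && !(cur.get? p.1 == some p.2))
             = (rest.any fun p => cur.contains p.1 && !(cur.get? p.1 == some p.2)) from by
            simp [hc]]
      simp [hitems, hc]

-- two filters with pointwise-implied predicates have equal length iff the implication reverses on l
lemma filter_length_eq_iff {α : Type} (r q : α → Bool) (l : List α)
    (h : ∀ x ∈ l, q x = true → r x = true) :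
    ((l.filter r).length = (l.filter q).length) ↔ ∀ x ∈ l, r x = true → q x = true := by
  induction l with
  | nil => simp
  | cons a t ih =>
    have hle : (t.filter q).length ≤ (t.filter r).length := by
      rw [← List.countP_eq_length_filter, ← List.countP_eq_length_filter]
      exact List.countP_mono_left (fun x hx => h x (by simp [hx]))
    have iht := ih (fun x hx => h x (by simp [hx]))
    cases hq : q a <;> cases hr : r a
    · simpa [List.filter_cons, hq, hr] using iht
    · have h1 : ((a :: t).filter r).length = (t.filter r).length + 1 := by
        simp [hr]
      have h2 : ((a :: t).filter q).length = (t.filter q).length := by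
        simp [hq]
      rw [h1, h2]
      constructor
      · intro he; omega
      · intro hall; exact absurd (hall a (by simp) hr) (by simp [hq])
    · have := h a (by simp) hq; simp [hr] at this
    · simpa [List.filter_cons, hq, hr] using iht

-- ===== VERDICT (by name: the statement is the Claim_ definition above) =====
theorem match_ids_py_spec : Claim_equal_match_ids_py := by
  intro point journey _ hpre
  obtain ⟨-, -, -, -, hpt, hjr⟩ := hpre
  show match_ids_py point journey = match_ids_py_alt point journey
  unfold match_ids_py match_ids_py_alt
  set curL := (PySem.Dict.mk journey).getD "set_ids" [] with hcurL
  set nxt := (PySem.Dict.mk point).getD 6 [] with hnxt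
  set cur := PySem.Dict.mk curL with hcur
  have hn : (nxt.map Prod.fst).Nodup :=
    getD_mk_prop (fun xs => (xs.map Prod.fst).Nodup) point 6 [] (by simp) hpt
  have hcn : (curL.map Prod.fst).Nodup :=
    getD_mk_prop (fun xs => (xs.map Prod.fst).Nodup) journey "set_ids" [] (by simp) hjr
  have hckeys : cur.keys.Nodup := by
    simpa [PySem.Dict.keys, hcur, PySem.Dict.items] using hcn
  -- the two pointwise predicates of A's loop
  set r : String × Int → Bool := fun p => cur.contains p.1 with hr
  set q : String × Int → Bool := fun p => cur.contains p.1 && (cur.get? p.1 == some p.2) with hqd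
  have hq_mem : ∀ p : String × Int, curL.contains p = q p := by
    intro p
    by_cases hp : p ∈ curL
    · have hget : cur.get? p.1 = some p.2 :=
        (PySem.Dict.get?_eq_some_iff_mem_items cur p.1 p.2 hckeys).mpr hp
      have hc : cur.contains p.1 = true := by
        rw [PySem.Dict.contains_eq_isSome_get?, hget]; rfl
      simp [hqd, hp, hc, hget]
    · have hng : ¬ cur.get? p.1 = some p.2 := fun hg =>
        hp ((PySem.Dict.get?_eq_some_iff_mem_items cur p.1 p.2 hckeys).mp hg)
      simp only [List.contains_eq_mem, hqd]
      simp [hp, hng]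
  have hcontains : ∀ k : String, (List.map (fun x : String × Int => x.1) curL).contains k = cur.contains k := by
    intro k
    rw [PySem.Dict.contains_eq_decide_mem_keys, List.contains_eq_mem]
    rfl
  -- B's set operations as filters over nxt (stated in the goal's unfolded form)
  have hcommon : PySem.Set.inter (PySem.Set.ofList (List.map (fun x : String × Int => x.1) nxt)) (List.map (fun x : String × Int => x.1) curL)
      = (List.map (fun x : String × Int => x.1) nxt).filter (fun k => cur.contains k) := by
    rw [PySem.Set.ofList_eq_self_of_nodup _ hn]
    exact List.filter_congr (fun x _ => hcontains x)
  have hnodup_nxt : nxt.Nodup := hn.of_map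
  have hinter : PySem.Set.inter (PySem.Set.ofList nxt) curL = nxt.filter q := by
    rw [PySem.Set.ofList_eq_self_of_nodup _ hnodup_nxt]
    exact List.filter_congr (fun p _ => hq_mem p)
  have hqr : ∀ x ∈ nxt, q x = true → r x = true := by
    intro x _ hx
    simp only [hqd, Bool.and_eq_true] at hx
    simp [hr, hx.1]
  have hlen_common : ((List.map (fun x : String × Int => x.1) nxt).filter (fun k => cur.contains k)).length
      = (nxt.filter r).length := by
    rw [← List.countP_eq_length_filter, ← List.countP_eq_length_filter, List.countP_map]
    rfl
  -- the guard: lengths equal iff no conflict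
  have hguard : ((nxt.filter r).length = (nxt.filter q).length)
      ↔ (nxt.any (fun p => cur.contains p.1 && !(cur.get? p.1 == some p.2))) = false := by
    rw [filter_length_eq_iff r q nxt hqr]
    constructor
    · intro hall
      simp only [List.any_eq_false]
      intro p hp
      by_cases hc : cur.contains p.1 = true
      · have hq2 := hall p hp (by simp [hr, hc])
        simp only [hqd, Bool.and_eq_true] at hq2
        simp [hc, hq2.2]
      · simp only [Bool.not_eq_true] at hc
        simp [hc]
    · intro hany p hp hrx
      simp only [List.any_eq_false] at hany
      have hthis := hany p hp
      simp only [hr] at hrx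
      have hb : (cur.get? p.1 == some p.2) = true := by
        by_contra hnb
        simp only [Bool.not_eq_true] at hnb
        simp [hrx, hnb] at hthis
      simp [hqd, hrx, hb]
  rw [matchIdsLoopA_eq cur nxt PySem.Dict.empty PySem.Dict.empty hn
        (by simp [PySem.Dict.contains_empty]) (by simp [PySem.Dict.contains_empty])]
  simp only [PySem.Dict.keys]
  rw [hcommon, hinter, hlen_common]
  by_cases hcond : (nxt.filter r).length = (nxt.filter q).length
  · have hany : (nxt.any fun p => cur.contains p.1 && !(cur.get? p.1 == some p.2)) = false :=
      hguard.mp hcond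
    rw [hany, hcond]
    simp only [Bool.false_eq_true, if_false, ne_eq, not_true_eq_false, if_false,
      PySem.Dict.empty, List.nil_append]
    have hcc : ∀ p ∈ nxt,
        PySem.Set.contains ((List.map (fun x : String × Int => x.1) nxt).filter (fun k => cur.contains k)) p.1 = r p := by
      intro p hp
      rw [PySem.Set.contains_eq_listContains, List.contains_eq_mem]
      by_cases hcp : cur.contains p.1 = true
      · simp [List.mem_filter, hcp, hr, List.mem_map_of_mem (f := fun x : String × Int => x.1) hp]
      · simp only [Bool.not_eq_true] at hcp
        simp [List.mem_filter, hcp, hr]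
    refine Prod.ext rfl (Prod.ext ?_ ?_) <;> simp only
    · rw [List.filter_congr (fun p hp => (hcc p hp).symm)]
    · rw [List.filter_congr (l := nxt)
            (p := fun p => !r p)
            (q := fun p => !PySem.Set.contains ((List.map (fun x : String × Int => x.1) nxt).filter (fun k => cur.contains k)) p.1)
            (fun p hp => (congrArg (fun b => !b) (hcc p hp)).symm)]
  · have hany : (nxt.any fun p => cur.contains p.1 && !(cur.get? p.1 == some p.2)) = true := by
      cases h : (nxt.any fun p => cur.contains p.1 && !(cur.get? p.1 == some p.2)) with
      | false => exact absurd (hguard.mpr h) hcond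
      | true => rfl
    rw [hany]
    simp [hcond]
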